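-- pv_equiv track=rewrite | github.com/tpoveda/tp-dcc | tp/python/strings.py | camel_case_to_title
-- ===== SOURCE A (Python) =====
-- def camel_case_to_title(text: str) -> str:
--     """
--     Split string by upper case letters and return a nice name.
--
--     :param text:  string to convert.
--     :return: camel case string.
--     """
--
--     words = list()
--     char_pos = 0
--     for curr_char_pos, char in enumerate(text):
--         if char.isupper() and char_pos < curr_char_pos:
--             words.append(text[char_pos:curr_char_pos].title())
--             char_pos = curr_char_pos
--     words.append(text[char_pos:].title())
--     return " ".join(words)
-- ===== SOURCE B (Python) =====
-- def camel_case_to_title(text: str) -> str: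
--     """
--     Split string by upper case letters and return a nice name.
--
--     :param text:  string to convert.
--     :return: camel case string.
--     """
--
--     out = []
--     prev_cased = False
--     for i, ch in enumerate(text):
--         if i > 0 and ch.isupper():
--             out.append(" ")
--             prev_cased = False
--         if ch.isalpha():
--             out.append(ch.lower() if prev_cased else ch.upper())
--             prev_cased = True
--         else:
--             out.append(ch)
--             prev_cased = False
--     return "".join(out)
-- ===== Notes on version B (the rewrite author's own statement) =====
-- stated objective: alternative
-- what changed: Replaces A's word-structured algorithm (split at uppercase positions, slice each word, call str.title on it, join the word list with spaces) by a single character-level streaming pass that never slices or titles: it emits a space before each non-initial uppercase character and title-cases on the fly by carrying one boolean of casing state.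
import Mathlib
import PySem

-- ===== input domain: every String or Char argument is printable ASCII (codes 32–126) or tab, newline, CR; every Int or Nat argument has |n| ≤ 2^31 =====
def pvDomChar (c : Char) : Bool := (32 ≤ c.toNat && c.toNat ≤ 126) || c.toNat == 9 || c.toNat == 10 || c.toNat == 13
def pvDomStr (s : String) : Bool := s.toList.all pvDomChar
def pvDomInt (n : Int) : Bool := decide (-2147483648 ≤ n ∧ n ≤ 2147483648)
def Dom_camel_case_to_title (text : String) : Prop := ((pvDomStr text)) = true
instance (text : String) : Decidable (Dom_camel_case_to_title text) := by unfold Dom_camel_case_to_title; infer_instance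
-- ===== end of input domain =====

-- B replaces A's slice-title-join word machinery by a single character-level pass that emits a
-- space before each non-initial uppercase letter and title-cases on the fly with one Boolean of
-- casing state (no slicing, no str.title, no word list) — same result, different algorithm.

-- ===== PORT A =====
-- hand port of Python's str.title() (PySem has none): exact on ASCII, where 'cased' = alphabetic
def pyTitleAux : List Char → Bool → List Char
  | [], _ => []
  | c :: cs, prevCased =>
    if PySem.Chars.isalpha c then
      (if prevCased then PySem.Chars.lowerChar c else PySem.Chars.upperChar c) :: pyTitleAux cs true
    else c :: pyTitleAux cs false

def pyTitle (cs : List Char) : List Char := pyTitleAux cs false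

-- the loop body of A: state = (words, char_pos), item = (curr_char_pos, char)
def stepA (tl : List Char) (s : List (List Char) × Int) (p : Int × Char) : List (List Char) × Int :=
  if PySem.Chars.isupper p.2 && decide (s.2 < p.1) then
    (s.1 ++ [pyTitle (PySem.List.slice tl (some s.2) (some p.1))], p.1)
  else s

def camel_case_to_title (text : String) : String :=
  let tl := text.toList
  let st := (PySem.List.enumerate tl 0).foldl (stepA tl) ([], 0)
  let words := st.1 ++ [pyTitle (PySem.List.slice tl (some st.2) none)]
  String.ofList (PySem.Chars.join [' '] words)

-- ===== PORT B =====
-- the loop body of B: state = (out, prev_cased), item = (i, ch)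
def stepB (s : List Char × Bool) (p : Int × Char) : List Char × Bool :=
  let s1 := if decide (0 < p.1) && PySem.Chars.isupper p.2 then (s.1 ++ [' '], false) else s
  if PySem.Chars.isalpha p.2 then
    (s1.1 ++ [if s1.2 then PySem.Chars.lowerChar p.2 else PySem.Chars.upperChar p.2], true)
  else (s1.1 ++ [p.2], false)

def camel_case_to_title_alt (text : String) : String :=
  String.ofList ((PySem.List.enumerate text.toList 0).foldl stepB ([], false)).1

-- ===== PRECONDITION & SPEC =====
def Spec_camel_case_to_title (text : String) (out : String) : Prop := out = camel_case_to_title_alt text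
instance (text : String) (out : String) : Decidable (Spec_camel_case_to_title text out) := by unfold Spec_camel_case_to_title; infer_instance

-- ===== CLAIM (what is proved, stated in full; the proofs are below) =====
def Claim_equal_camel_case_to_title : Prop := ∀ (text : String), Dom_camel_case_to_title text → Spec_camel_case_to_title text (camel_case_to_title text)

-- ===== LEMMAS AND PROOFS =====

-- the single-character transform B applies, and the carried casing flag
def tstep (c : Char) (pc : Bool) : Char :=
  if PySem.Chars.isalpha c then
    (if pc then PySem.Chars.lowerChar c else PySem.Chars.upperChar c)
  else c

def carry : List Char → Bool → Bool
  | [], b => b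
  | c :: cs, _ => carry cs (PySem.Chars.isalpha c)

theorem pyTitleAux_cons (c : Char) (cs : List Char) (b : Bool) :
    pyTitleAux (c :: cs) b = tstep c b :: pyTitleAux cs (PySem.Chars.isalpha c) := by
  by_cases h : PySem.Chars.isalpha c = true <;> simp [pyTitleAux, tstep, h]

theorem carry_snoc (w : List Char) (c : Char) (b : Bool) :
    carry (w ++ [c]) b = PySem.Chars.isalpha c := by
  induction w generalizing b with
  | nil => simp [carry]
  | cons x xs ih => simp [carry, ih]

theorem pyTitleAux_snoc (w : List Char) (c : Char) (b : Bool) :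
    pyTitleAux (w ++ [c]) b = pyTitleAux w b ++ [tstep c (carry w b)] := by
  induction w generalizing b with
  | nil => simp [pyTitleAux, pyTitleAux_cons, carry]
  | cons x xs ih => simp [pyTitleAux_cons, carry, ih]

-- join with " " over a non-empty word list, one more word / one more char on the last word
theorem join_snoc (l : List (List Char)) (w : List Char) (h : l ≠ []) :
    PySem.Chars.join [' '] (l ++ [w]) = PySem.Chars.join [' '] l ++ ' ' :: w := by
  induction l with
  | nil => exact absurd rfl h
  | cons a l' ih =>
    cases l' with
    | nil => simp [PySem.Chars.join_cons_cons, PySem.Chars.join_singleton]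
    | cons b l'' =>
      rw [show (a :: b :: l'') ++ [w] = a :: b :: (l'' ++ [w]) from rfl,
        PySem.Chars.join_cons_cons,
        show (b :: (l'' ++ [w])) = (b :: l'') ++ [w] from rfl,
        ih (by simp), PySem.Chars.join_cons_cons]
      simp

theorem join_last_append (l : List (List Char)) (w t : List Char) :
    PySem.Chars.join [' '] (l ++ [w ++ t]) = PySem.Chars.join [' '] (l ++ [w]) ++ t := by
  cases l with
  | nil => simp [PySem.Chars.join_singleton]
  | cons a l' => rw [join_snoc _ _ (by simp), join_snoc _ _ (by simp)]; simp

-- a convenient closed form of B's step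
theorem stepB_eq (out : List Char) (pc : Bool) (i : Int) (c : Char) :
    stepB (out, pc) (i, c) =
      (if decide (0 < i) && PySem.Chars.isupper c then
        (out ++ ' ' :: [tstep c false], PySem.Chars.isalpha c)
      else (out ++ [tstep c pc], PySem.Chars.isalpha c)) := by
  by_cases hu : (decide (0 < i) && PySem.Chars.isupper c) = true <;>
    by_cases ha : PySem.Chars.isalpha c = true <;>
      simp [stepB, tstep, hu, ha]

-- slice facts used by the invariant
theorem slice_snoc (tl : List Char) (a s : Nat) (c : Char) (rest : List Char)
    (hd : tl.drop s = c :: rest) (has : a ≤ s) :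
    PySem.List.slice tl (some (a : Int)) (some ((s : Int) + 1))
      = PySem.List.slice tl (some (a : Int)) (some (s : Int)) ++ [c] := by
  have e1 : ((s : Int) + 1) = ((s + 1 : Nat) : Int) := by push_cast; ring
  rw [e1, PySem.List.slice_natCast, PySem.List.slice_natCast]
  have hget : tl[s]? = some c := by
    have h0 : (tl.drop s)[0]? = some c := by rw [hd]; rfl
    rw [List.getElem?_drop] at h0
    simpa using h0
  have h2 : (tl.drop a)[s - a]? = some c := by
    rw [List.getElem?_drop]
    have : a + (s - a) = s := by omega
    rw [this, hget]
  have h3 : s + 1 - a = (s - a) + 1 := by omega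
  rw [h3, List.take_add_one, h2]
  simp

theorem slice_full (tl : List Char) (a s : Nat) (hlen : tl.length ≤ s) :
    PySem.List.slice tl (some (a : Int)) (some (s : Int))
      = PySem.List.slice tl (some (a : Int)) none := by
  rw [PySem.List.slice_natCast, PySem.List.slice_from_natCast]
  exact List.take_of_length_le (by simp; omega)

-- the joint loop invariant: running B's streaming loop from index s with the stated relation
-- between its state and A's state produces exactly A's final join
theorem joint (tl : List Char) :
    ∀ (xs : List Char) (s : Nat), xs = tl.drop s → 1 ≤ s →
    ∀ (ws : List (List Char)) (cp : Nat) (out : List Char) (pc : Bool), cp < s →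
    out = PySem.Chars.join [' ']
        (ws ++ [pyTitle (PySem.List.slice tl (some (cp : Int)) (some (s : Int)))]) →
    pc = carry (PySem.List.slice tl (some (cp : Int)) (some (s : Int))) false →
    ((PySem.List.enumerate xs (s : Int)).foldl stepB (out, pc)).1
      = PySem.Chars.join [' ']
          (((PySem.List.enumerate xs (s : Int)).foldl (stepA tl) (ws, (cp : Int))).1
            ++ [pyTitle (PySem.List.slice tl
                 (some ((PySem.List.enumerate xs (s : Int)).foldl (stepA tl)
                          (ws, (cp : Int))).2) none)]) := by
  intro xs
  induction xs with
  | nil =>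
    intro s hx h1 ws cp out pc hcp hout hpc
    have hlen : tl.length <= s := by
      by_contra h
      have hne : tl.drop s ≠ [] := by
        apply List.ne_nil_of_length_pos
        simp
        omega
      exact hne hx.symm
    simp only [PySem.List.enumerate_nil, List.foldl_nil]
    rw [hout, slice_full tl cp s hlen]
  | cons c rest ih =>
    intro s hx h1 ws cp out pc hcp hout hpc
    have hrest : rest = tl.drop (s + 1) := by
      have h2 : rest = (tl.drop s).tail := by rw [← hx]; rfl
      rw [h2, List.tail_drop]
    have hsl1 : PySem.List.slice tl (some (s : Int)) (some ((s : Int) + 1)) = [c] := by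
      rw [slice_snoc tl s s c rest hx.symm le_rfl, PySem.List.slice_natCast]
      simp
    have e1 : ((s : Int) + 1) = ((s + 1 : Nat) : Int) := by push_cast; ring
    rw [PySem.List.enumerate_cons, List.foldl_cons, List.foldl_cons, stepB_eq]
    by_cases hu : PySem.Chars.isupper c = true
    · -- uppercase at index s ≥ 1: both split here
      have hdec : decide ((cp : Int) < (s : Int)) = true := by
        simp only [decide_eq_true_eq]
        exact_mod_cast hcp
      have hgA : stepA tl (ws, (cp : Int)) ((s : Int), c)
          = (ws ++ [pyTitle (PySem.List.slice tl (some (cp : Int)) (some (s : Int)))],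
             (s : Int)) := by
        unfold stepA
        rw [hu, hdec]
        rfl
      have hg : (decide (0 < (s : Int)) && PySem.Chars.isupper c) = true := by
        rw [hu]
        simp only [Bool.and_true, decide_eq_true_eq]
        exact_mod_cast h1
      have hT1 : pyTitle [c] = [tstep c false] := by
        rw [pyTitle, pyTitleAux_cons]
        rfl
      rw [hg, if_pos rfl, hgA, e1]
      rw [ih (s + 1) hrest (by omega)
        (ws ++ [pyTitle (PySem.List.slice tl (some (cp : Int)) (some (s : Int)))]) s
        _ _ (by omega) ?_ ?_]
      · rw [← e1, hsl1, hT1, join_snoc _ _ (by simp), ← hout]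
      · rw [← e1, hsl1]
        simp [carry]
    · -- no split: A's state unchanged, B appends the transformed char
      rw [Bool.not_eq_true] at hu
      have hgA : stepA tl (ws, (cp : Int)) ((s : Int), c) = (ws, (cp : Int)) := by
        unfold stepA
        rw [hu, Bool.false_and]
        rfl
      have hg : (decide (0 < (s : Int)) && PySem.Chars.isupper c) = false := by
        rw [hu, Bool.and_false]
      have hsl : PySem.List.slice tl (some (cp : Int)) (some ((s + 1 : Nat) : Int))
          = PySem.List.slice tl (some (cp : Int)) (some (s : Int)) ++ [c] := by
        rw [← e1]
        exact slice_snoc tl cp s c rest hx.symm (by omega)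
      rw [hg, if_neg (by simp), hgA, e1]
      rw [ih (s + 1) hrest (by omega) ws cp _ _ (by omega) ?_ ?_]
      · rw [hsl]
        have hT : pyTitle (PySem.List.slice tl (some (cp : Int)) (some (s : Int)) ++ [c])
            = pyTitle (PySem.List.slice tl (some (cp : Int)) (some (s : Int)))
                ++ [tstep c pc] := by
          rw [pyTitle, pyTitle, pyTitleAux_snoc, ← hpc]
        rw [hT, join_last_append, ← hout]
      · rw [hsl, carry_snoc]

-- ===== VERDICT (by name: the statement is the Claim_ definition above) =====
theorem camel_case_to_title_spec : Claim_equal_camel_case_to_title := by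
  intro text _
  unfold Spec_camel_case_to_title camel_case_to_title camel_case_to_title_alt
  cases htl : text.toList with
  | nil =>
    simp [PySem.List.enumerate_nil, pyTitle, pyTitleAux, PySem.List.slice,
      PySem.Chars.join_singleton]
  | cons c rest =>
    dsimp only
    have hA0 : stepA (c :: rest) (([], 0) : List (List Char) × Int) ((0 : Int), c)
        = ([], 0) := by
      unfold stepA
      simp
    have hB0 : stepB (([], false) : List Char × Bool) ((0 : Int), c)
        = ([tstep c false], PySem.Chars.isalpha c) := by
      rw [stepB_eq]
      simp
    have e1 : ((0 : Int) + 1) = ((1 : Nat) : Int) := by norm_num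
    have e0 : (0 : Int) = ((0 : Nat) : Int) := by norm_num
    have hsl : PySem.List.slice (c :: rest) (some ((0 : Nat) : Int)) (some ((1 : Nat) : Int))
        = [c] := by
      rw [PySem.List.slice_natCast]
      simp
    have hmain := joint (c :: rest) rest 1 (by simp) le_rfl [] 0
      [tstep c false] (PySem.Chars.isalpha c) (by omega) ?_ ?_
    · rw [PySem.List.enumerate_cons, List.foldl_cons, List.foldl_cons, hA0, hB0, e1, e0,
        hmain]
    · rw [hsl]
      have hT1 : pyTitle [c] = [tstep c false] := by
        rw [pyTitle, pyTitleAux_cons]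
        rfl
      rw [hT1]
      simp [PySem.Chars.join_singleton]
    · rw [hsl]
      simp [carry]
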